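-- pv_equiv track=rewrite | github.com/Altynai/LeetCode | find-two-non-overlapping-sub-arrays-each-with-target-sum/answer.py | minSumOfLengths
-- ===== SOURCE A (Python) =====
-- from typing import List
--
-- from math import inf
--
-- def array(a, val=None):
--     return [val for _ in range(a)]
--
-- def minSumOfLengths(arr: List[int], target: int) -> int:
--     n = len(arr)
--     a = array(n + 1, inf)
--     s = 0
--
--     where = dict()
--     where[0] = 0
--     for i in range(1, n + 1):
--         s += arr[i - 1]
--         if (s - target) in where:
--             a[i] = i - where[s - target]
--         where[s] = i
--
--     b = array(n + 1, inf)
--     s = 0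
--     where = dict()
--     where[0] = n + 1
--     for i in range(n, 0, -1):
--         s += arr[i - 1]
--         if (s - target) in where:
--             b[i] = where[s - target] - i
--         where[s] = i
--
--     c = array(n + 1, inf)
--     c[n] = b[n]
--     for i in range(n - 1, 0, -1):
--         c[i] = min(b[i], c[i + 1])
--
--     ans = inf
--     for i in range(1, n):
--         ans = min(ans, a[i] + c[i + 1])
--
--     return -1 if ans == inf else ans
-- ===== SOURCE B (Python) =====
-- from math import inf
--
-- def minSumOfLengths(arr, target):
--     # Single forward pass: prefix-sum hashmap (last occurrence), running
--     # prefix-min of best subarray lengths, combine on the fly.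
--     where = {0: 0}            # prefix-sum value -> last index with that prefix sum
--     pmin = [inf]              # pmin[k] = min length of a target subarray within arr[:k]
--     s = 0
--     ans = inf
--     for i, x in enumerate(arr, 1):
--         s += x
--         cur = inf
--         p = where.get(s - target)
--         if p is not None:
--             cur = i - p
--             ans = min(ans, cur + pmin[p])
--         pmin.append(min(pmin[-1], cur))
--         where[s] = i
--     return -1 if ans == inf else ans
-- ===== Notes on version B (the rewrite author's own statement) =====
-- stated objective: simpler
-- what changed: A's four passes (forward shortest-ending array, backward shortest-starting array, suffix-min array, combine loop) are replaced by one forward pass that keeps a prefix-sum hashmap and a running prefix-minimum of subarray lengths and combines each found target subarray with the best earlier one on the fly.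
import Mathlib
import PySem

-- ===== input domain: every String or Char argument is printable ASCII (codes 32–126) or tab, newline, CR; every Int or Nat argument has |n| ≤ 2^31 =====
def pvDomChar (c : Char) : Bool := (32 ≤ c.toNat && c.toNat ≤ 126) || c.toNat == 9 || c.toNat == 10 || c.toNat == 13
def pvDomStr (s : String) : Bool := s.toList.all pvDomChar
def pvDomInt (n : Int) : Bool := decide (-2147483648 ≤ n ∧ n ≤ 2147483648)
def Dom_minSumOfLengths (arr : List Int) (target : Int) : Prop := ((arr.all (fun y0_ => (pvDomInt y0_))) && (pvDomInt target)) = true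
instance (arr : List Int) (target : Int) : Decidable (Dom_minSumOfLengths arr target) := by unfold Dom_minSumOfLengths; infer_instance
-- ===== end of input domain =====

-- B replaces A's four passes (forward, backward, suffix-min, combine) by ONE forward pass that
-- combines each target-sum subarray with the running prefix-minimum of earlier subarray lengths
-- (objective: simpler).
-- Ports: Python's float `inf` is modeled as ⊤ in `WithTop Int`; the Python lists a/b/c/pmin and
-- the dict `where` are only read/written pointwise, so they are ported exactly as update-functions;
-- each Python for-loop is the structural recursion on its iteration count.

-- ===== PORT A =====
def pvUpd (f : Int → Option Nat) (k : Int) (v : Nat) : Int → Option Nat :=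
  fun x => if x = k then some v else f x

def pvSet (f : Nat → WithTop Int) (k : Nat) (v : WithTop Int) : Nat → WithTop Int :=
  fun x => if x = k then v else f x

-- `for i in range(1, n+1)` of A's first loop; state after k iterations is (where, s, a), i = k+1.
def passA1 (arr : List Int) (target : Int) : Nat → ((Int → Option Nat) × Int × (Nat → WithTop Int))
  | 0 => (pvUpd (fun _ => none) 0 0, 0, fun _ => ⊤)
  | k+1 =>
    let st := passA1 arr target k
    let wh := st.1
    let s' := st.2.1 + arr.getD k 0          -- s += arr[i-1]; index k = i-1 is always in range
    let a' := match wh (s' - target) with    -- if (s-target) in where: a[i] = i - where[s-target]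
      | some p => pvSet st.2.2 (k+1) (((((k+1 : Nat) : Int) - (p : Int)) : Int))
      | none => st.2.2
    (pvUpd wh s' (k+1), s', a')              -- where[s] = i

-- `for i in range(n, 0, -1)` of A's second loop; after t iterations i = n,…,n-t+1 are done.
def passA2 (arr : List Int) (target : Int) (n : Nat) : Nat → ((Int → Option Nat) × Int × (Nat → WithTop Int))
  | 0 => (pvUpd (fun _ => none) 0 (n+1), 0, fun _ => ⊤)
  | t+1 =>
    let st := passA2 arr target n t
    let wh := st.1
    let i := n - t
    let s' := st.2.1 + arr.getD (i-1) 0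
    let b' := match wh (s' - target) with
      | some q => pvSet st.2.2 i ((((q : Int) - (i : Int)) : Int))
      | none => st.2.2
    (pvUpd wh s' i, s', b')

-- `c[n] = b[n]` then `for i in range(n-1, 0, -1)`; after t iterations i = n-1,…,n-t are done.
def passA3 (b : Nat → WithTop Int) (n : Nat) : Nat → (Nat → WithTop Int)
  | 0 => pvSet (fun _ => ⊤) n (b n)
  | t+1 =>
    let c := passA3 b n t
    let i := n - 1 - t
    pvSet c i (min (b i) (c (i+1)))

-- `for i in range(1, n)`: ans = min(ans, a[i] + c[i+1]); after k iterations i = 1,…,k are done.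
def ansLoopA (a c : Nat → WithTop Int) : Nat → WithTop Int
  | 0 => ⊤
  | k+1 => min (ansLoopA a c k) (a (k+1) + c (k+2))

-- `return -1 if ans == inf else ans`
def pvFin : WithTop Int → Int
  | none => -1
  | some v => v

def minSumOfLengths (arr : List Int) (target : Int) : Int :=
  let n := arr.length
  pvFin (ansLoopA (passA1 arr target n).2.2 (passA3 (passA2 arr target n n).2.2 n (n-1)) (n-1))

-- ===== PORT B =====
-- Source B's single loop; state after k iterations is (where, pmin, s, ans); pmin is the list
-- [pmin[0],…,pmin[k]] as an update-function (pmin[-1] = pmin at index k), i = k+1.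
def passB (arr : List Int) (target : Int) : Nat → ((Int → Option Nat) × (Nat → WithTop Int) × Int × WithTop Int)
  | 0 => (pvUpd (fun _ => none) 0 0, fun _ => ⊤, 0, ⊤)
  | k+1 =>
    let st := passB arr target k
    let wh := st.1
    let pm := st.2.1
    let s' := st.2.2.1 + arr.getD k 0
    match wh (s' - target) with
    | some p =>
      let cur : WithTop Int := ((((k+1 : Nat) : Int) - (p : Int)) : Int)
      (pvUpd wh s' (k+1), pvSet pm (k+1) (min (pm k) cur), s', min st.2.2.2 (cur + pm p))
    | none =>
      (pvUpd wh s' (k+1), pvSet pm (k+1) (min (pm k) ⊤), s', st.2.2.2)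

def minSumOfLengths_alt (arr : List Int) (target : Int) : Int :=
  pvFin (passB arr target arr.length).2.2.2

-- ===== PRECONDITION & SPEC =====
def Spec_minSumOfLengths (arr : List Int) (target : Int) (out : Int) : Prop := out = minSumOfLengths_alt arr target
instance (arr : List Int) (target : Int) (out : Int) : Decidable (Spec_minSumOfLengths arr target out) := by unfold Spec_minSumOfLengths; infer_instance

-- ===== CLAIM (what is proved, stated in full; the proofs are below) =====
def Claim_equal_minSumOfLengths : Prop := ∀ (arr : List Int) (target : Int), Dom_minSumOfLengths arr target → Spec_minSumOfLengths arr target (minSumOfLengths arr target)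

-- ===== LEMMAS AND PROOFS =====

-- prefix sums
def pfx (arr : List Int) (k : Nat) : Int := (arr.take k).sum

-- last index p ≤ k with pfx p = v (= A's/B's forward dict after k insertions)
def lastP (arr : List Int) : Nat → Int → Option Nat
  | 0, v => if v = 0 then some 0 else none
  | k+1, v => if v = pfx arr (k+1) then some (k+1) else lastP arr k v

-- shortest target subarray ending at i (as ⊤ / its length)
def aFun (arr : List Int) (target : Int) (i : Nat) : WithTop Int :=
  match lastP arr (i-1) (pfx arr i - target) with
  | some p => ((((i : Int) - (p : Int)) : Int) : WithTop Int)
  | none => ⊤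

-- A's backward dict after t iterations (keys are suffix sums pfx n - pfx (q-1), values q)
def Qd (arr : List Int) (n : Nat) : Nat → Int → Option Nat
  | 0, v => if v = 0 then some (n+1) else none
  | t+1, v => if v = pfx arr n - pfx arr (n-t-1) then some (n-t) else Qd arr n t v

def bFun (arr : List Int) (target : Int) (i : Nat) : WithTop Int :=
  match Qd arr arr.length (arr.length - i) (pfx arr arr.length - pfx arr (i-1) - target) with
  | some q => ((((q : Int) - (i : Int)) : Int) : WithTop Int)
  | none => ⊤

def bG (arr : List Int) (target : Int) (j : Nat) : WithTop Int :=
  if 1 ≤ j ∧ j ≤ arr.length then bFun arr target j else ⊤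

def cAux (b : Nat → WithTop Int) : Nat → Nat → WithTop Int
  | 0, j => b j
  | d+1, j => min (b j) (cAux b d (j+1))

def cFun (arr : List Int) (target : Int) (j : Nat) : WithTop Int :=
  cAux (bG arr target) (arr.length - j) j

def pminFun (arr : List Int) (target : Int) : Nat → WithTop Int
  | 0 => ⊤
  | p+1 => min (pminFun arr target p) (aFun arr target (p+1))

def termA (arr : List Int) (target : Int) (i : Nat) : WithTop Int :=
  aFun arr target i + cFun arr target (i+1)

def termB (arr : List Int) (target : Int) (i : Nat) : WithTop Int :=
  match lastP arr (i-1) (pfx arr i - target) with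
  | some p => ((((i : Int) - (p : Int)) : Int) : WithTop Int) + pminFun arr target p
  | none => ⊤

-- generic min-accumulating loop over i = 1..m
def gm (f : Nat → WithTop Int) : Nat → WithTop Int
  | 0 => ⊤
  | k+1 => min (gm f k) (f (k+1))

theorem gm_le (f : Nat → WithTop Int) {i m : Nat} (h1 : 1 ≤ i) (h2 : i ≤ m) :
    gm f m ≤ f i := by
  induction m with
  | zero => omega
  | succ k ih =>
    by_cases h : i = k + 1
    · subst h; exact min_le_right _ _
    · exact le_trans (min_le_left _ _) (ih (by omega))

theorem le_gm (f : Nat → WithTop Int) {x : WithTop Int} {m : Nat}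
    (h : ∀ i, 1 ≤ i → i ≤ m → x ≤ f i) : x ≤ gm f m := by
  induction m with
  | zero => exact le_top
  | succ k ih =>
    exact le_min (ih (fun i h1 h2 => h i h1 (by omega))) (h (k+1) (by omega) (by omega))

theorem pfx_succ (arr : List Int) (k : Nat) :
    pfx arr (k+1) = pfx arr k + arr.getD k 0 := by
  by_cases h : k < arr.length
  · have ht : arr.take (k+1) = arr.take k ++ [arr.getD k 0] := by
      rw [List.take_add_one]
      simp [List.getD, List.getElem?_eq_getElem h]
    rw [pfx, pfx, ht, List.sum_append, List.sum_cons, List.sum_nil, add_zero]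
  · have h1 : arr.take (k+1) = arr := List.take_of_length_le (by omega)
    have h2 : arr.take k = arr := List.take_of_length_le (by omega)
    simp [pfx, h1, h2, List.getD, List.getElem?_eq_none_iff.mpr (by omega : arr.length ≤ k)]

theorem lastP_sound (arr : List Int) (k : Nat) (v : Int) (p : Nat)
    (h : lastP arr k v = some p) : p ≤ k ∧ pfx arr p = v := by
  induction k with
  | zero =>
    simp only [lastP] at h
    split at h
    · cases h; simp [pfx]; omega
    · cases h
  | succ m ih =>
    simp only [lastP] at h
    split at h
    · rename_i hv; cases h; exact ⟨le_refl _, hv.symm⟩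
    · obtain ⟨h1, h2⟩ := ih h; exact ⟨by omega, h2⟩

theorem lastP_complete (arr : List Int) (k : Nat) (v : Int) (p : Nat)
    (hp : p ≤ k) (hv : pfx arr p = v) : ∃ p', lastP arr k v = some p' ∧ p ≤ p' := by
  induction k with
  | zero =>
    have hp0 : p = 0 := by omega
    subst hp0
    simp only [lastP]
    rw [if_pos (by simpa [pfx] using hv.symm)]
    exact ⟨0, rfl, le_refl _⟩
  | succ m ih =>
    simp only [lastP]
    split
    · exact ⟨m+1, rfl, hp⟩
    · rename_i hne
      have hpm : p ≤ m := by
        rcases Nat.lt_or_ge p (m+1) with h | h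
        · omega
        · exfalso; exact hne (by rw [← hv]; congr 1; omega)
      obtain ⟨p', h1, h2⟩ := ih hpm
      exact ⟨p', h1, h2⟩

theorem aFun_sound (arr : List Int) (target : Int) (i : Nat) (h1 : 1 ≤ i)
    (h : aFun arr target i ≠ ⊤) :
    ∃ p, p < i ∧ pfx arr i - pfx arr p = target ∧
      aFun arr target i = (((i : Int) - (p : Int) : Int) : WithTop Int) := by
  unfold aFun at *
  cases hl : lastP arr (i-1) (pfx arr i - target) with
  | none => rw [hl] at h; simp at h
  | some p =>
    obtain ⟨hp, hv⟩ := lastP_sound arr (i-1) _ p hl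
    exact ⟨p, by omega, by omega, rfl⟩

theorem Qd_sound (arr : List Int) (n t : Nat) (v : Int) (q : Nat)
    (h : Qd arr n t v = some q) : n+1-t ≤ q ∧ q ≤ n+1 ∧ pfx arr n - pfx arr (q-1) = v := by
  induction t with
  | zero =>
    simp only [Qd] at h
    split at h
    · rename_i hv; cases h; refine ⟨by omega, by omega, ?_⟩; simp; omega
    · cases h
  | succ m ih =>
    simp only [Qd] at h
    split at h
    · rename_i hv; cases h
      refine ⟨by omega, by omega, ?_⟩
      rw [← hv]
    · obtain ⟨h1, h2, h3⟩ := ih h; exact ⟨by omega, h2, h3⟩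

theorem Qd_complete (arr : List Int) (n t : Nat) (v : Int) (q : Nat)
    (ht : t ≤ n) (h1 : n+1-t ≤ q) (h2 : q ≤ n+1) (hv : pfx arr n - pfx arr (q-1) = v) :
    ∃ q', Qd arr n t v = some q' ∧ q' ≤ q := by
  induction t with
  | zero =>
    have hq : q = n+1 := by omega
    subst hq
    simp only [Qd]
    rw [if_pos]
    · exact ⟨n+1, rfl, le_refl _⟩
    · rw [← hv]; simp
  | succ m ih =>
    simp only [Qd]
    split
    · exact ⟨n - m, rfl, by omega⟩
    · rename_i hne
      have hq : n+1-m ≤ q := by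
        rcases Nat.lt_or_ge q (n+1-m) with h | h
        · exfalso
          have hqe : q = n - m := by omega
          exact hne (by rw [← hv, hqe])
        · exact h
      exact ih (by omega) hq

theorem bFun_sound (arr : List Int) (target : Int) (i : Nat) (h1 : 1 ≤ i)
    (h2 : i ≤ arr.length) (h : bFun arr target i ≠ ⊤) :
    ∃ q, i+1 ≤ q ∧ q ≤ arr.length + 1 ∧ pfx arr (q-1) - pfx arr (i-1) = target ∧
      bFun arr target i = (((q : Int) - (i : Int) : Int) : WithTop Int) := by
  unfold bFun at *
  cases hq : Qd arr arr.length (arr.length - i) (pfx arr arr.length - pfx arr (i-1) - target) with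
  | none => rw [hq] at h; simp at h
  | some q =>
    obtain ⟨hq1, hq2, hq3⟩ := Qd_sound arr arr.length (arr.length - i) _ q hq
    exact ⟨q, by omega, by omega, by omega, rfl⟩

theorem bFun_le (arr : List Int) (target : Int) {p e : Nat} (h1 : p < e)
    (h2 : e ≤ arr.length) (h3 : pfx arr e - pfx arr p = target) :
    bFun arr target (p+1) ≤ (((e : Int) - (p : Int) : Int) : WithTop Int) := by
  have hkey : pfx arr arr.length - pfx arr ((e+1)-1) = pfx arr arr.length - pfx arr ((p+1)-1) - target := by
    simp only [Nat.add_sub_cancel]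
    omega
  obtain ⟨q', hq, hle⟩ := Qd_complete arr arr.length (arr.length - (p+1))
    (pfx arr arr.length - pfx arr ((p+1)-1) - target) (e+1)
    (by omega) (by omega) (by omega) hkey
  unfold bFun
  rw [hq]
  exact WithTop.coe_le_coe.mpr (by omega)

theorem cAux_le (b : Nat → WithTop Int) (d j j' : Nat) (h1 : j ≤ j') (h2 : j' ≤ j + d) :
    cAux b d j ≤ b j' := by
  induction d generalizing j with
  | zero =>
    have : j' = j := by omega
    subst this; exact le_refl _
  | succ m ih =>
    by_cases h : j' = j
    · subst h; exact min_le_left _ _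
    · exact le_trans (min_le_right _ _) (ih (j+1) (by omega) (by omega))

theorem cAux_sound (b : Nat → WithTop Int) (d j : Nat) (h : cAux b d j ≠ ⊤) :
    ∃ j', j ≤ j' ∧ j' ≤ j + d ∧ cAux b d j = b j' := by
  induction d generalizing j with
  | zero => exact ⟨j, le_refl _, by omega, rfl⟩
  | succ m ih =>
    rcases min_cases (b j) (cAux b m (j+1)) with ⟨he, _⟩ | ⟨he, _⟩
    · exact ⟨j, le_refl _, by omega, he⟩
    · have hne : cAux b m (j+1) ≠ ⊤ := by
        intro ht; rw [show cAux b (m+1) j = min (b j) (cAux b m (j+1)) from rfl, he, ht] at h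
        exact h rfl
      obtain ⟨j', h1, h2, h3⟩ := ih (j+1) hne
      exact ⟨j', by omega, by omega, by rw [show cAux b (m+1) j = min (b j) (cAux b m (j+1)) from rfl, he, h3]⟩

theorem pminFun_le (arr : List Int) (target : Int) {k p : Nat} (h1 : 1 ≤ k) (h2 : k ≤ p) :
    pminFun arr target p ≤ aFun arr target k := by
  induction p with
  | zero => omega
  | succ m ih =>
    by_cases h : k = m + 1
    · subst h; exact min_le_right _ _
    · exact le_trans (min_le_left _ _) (ih (by omega))

theorem pminFun_sound (arr : List Int) (target : Int) (p : Nat)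
    (h : pminFun arr target p ≠ ⊤) :
    ∃ k, 1 ≤ k ∧ k ≤ p ∧ pminFun arr target p = aFun arr target k := by
  induction p with
  | zero => simp [pminFun] at h
  | succ m ih =>
    rcases min_cases (pminFun arr target m) (aFun arr target (m+1)) with ⟨he, _⟩ | ⟨he, _⟩
    · have hne : pminFun arr target m ≠ ⊤ := by
        intro ht
        rw [show pminFun arr target (m+1) = min (pminFun arr target m) (aFun arr target (m+1)) from rfl, he, ht] at h
        exact h rfl
      obtain ⟨k, h1, h2, h3⟩ := ih hne
      exact ⟨k, h1, by omega, by
        rw [show pminFun arr target (m+1) = min (pminFun arr target m) (aFun arr target (m+1)) from rfl, he, h3]⟩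
    · exact ⟨m+1, by omega, le_refl _, by
        rw [show pminFun arr target (m+1) = min (pminFun arr target m) (aFun arr target (m+1)) from rfl, he]⟩

-- the exchange argument, both directions
theorem ansA_le_termB (arr : List Int) (target : Int) (i : Nat) (h1 : 1 ≤ i)
    (h2 : i ≤ arr.length) :
    gm (termA arr target) (arr.length - 1) ≤ termB arr target i := by
  unfold termB
  cases hl : lastP arr (i-1) (pfx arr i - target) with
  | none => exact le_top
  | some p =>
    obtain ⟨hp, hv⟩ := lastP_sound arr (i-1) _ p hl
    show gm (termA arr target) (arr.length - 1) ≤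
      (((i : Int) - (p : Int) : Int) : WithTop Int) + pminFun arr target p
    by_cases hpm : pminFun arr target p = ⊤
    · rw [hpm, add_top]; exact le_top
    · obtain ⟨k, hk1, hk2, hk3⟩ := pminFun_sound arr target p hpm
      have hk4 : gm (termA arr target) (arr.length - 1) ≤ termA arr target k :=
        gm_le _ hk1 (by omega)
      have hb : bG arr target (p+1) ≤ (((i : Int) - (p : Int) : Int) : WithTop Int) := by
        rw [bG, if_pos ⟨by omega, by omega⟩]
        exact bFun_le arr target (by omega) h2 (by omega)
      have hc : cFun arr target (k+1) ≤ (((i : Int) - (p : Int) : Int) : WithTop Int) := by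
        refine le_trans ?_ hb
        rw [cFun]
        exact cAux_le _ _ _ _ (by omega) (by omega)
      calc gm (termA arr target) (arr.length - 1) ≤ termA arr target k := hk4
        _ = aFun arr target k + cFun arr target (k+1) := rfl
        _ ≤ aFun arr target k + (((i : Int) - (p : Int) : Int) : WithTop Int) :=
            add_le_add le_rfl hc
        _ = (((i : Int) - (p : Int) : Int) : WithTop Int) + aFun arr target k := add_comm _ _
        _ = (((i : Int) - (p : Int) : Int) : WithTop Int) + pminFun arr target p := by rw [hk3]

theorem ansB_le_termA (arr : List Int) (target : Int) (i : Nat) (h1 : 1 ≤ i)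
    (h2 : i ≤ arr.length - 1) :
    gm (termB arr target) arr.length ≤ termA arr target i := by
  unfold termA
  by_cases ha : aFun arr target i = ⊤
  · rw [ha, top_add]; exact le_top
  by_cases hc : cFun arr target (i+1) = ⊤
  · rw [hc, add_top]; exact le_top
  obtain ⟨p, hpi, hpt, hpe⟩ := aFun_sound arr target i (by omega) ha
  obtain ⟨j, hj1, hj2, hj3⟩ :=
    cAux_sound (bG arr target) (arr.length - (i+1)) (i+1) (by rw [cFun] at hc; exact hc)
  have hcb : cFun arr target (i+1) = bG arr target j := hj3
  have hbne : bG arr target j ≠ ⊤ := by rw [← hcb]; exact hc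
  have hjr : 1 ≤ j ∧ j ≤ arr.length := by
    by_contra hcon
    exact hbne (by rw [bG, if_neg hcon])
  have hbfne : bFun arr target j ≠ ⊤ := by
    rw [bG, if_pos hjr] at hbne; exact hbne
  obtain ⟨q, hq1, hq2, hq3, hq4⟩ := bFun_sound arr target j hjr.1 hjr.2 hbfne
  have hcf : cFun arr target (i+1) = (((q : Int) - (j : Int) : Int) : WithTop Int) := by
    rw [hcb, bG, if_pos hjr, hq4]
  obtain ⟨pm, hpm1, hpm2⟩ :=
    lastP_complete arr ((q-1)-1) (pfx arr (q-1) - target) (j-1) (by omega) (by omega)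
  obtain ⟨hpm3, _⟩ := lastP_sound arr ((q-1)-1) _ pm hpm1
  have hub : gm (termB arr target) arr.length ≤ termB arr target (q-1) :=
    gm_le _ (by omega) (by omega)
  unfold termB at hub
  rw [hpm1] at hub
  have hub2 : gm (termB arr target) arr.length
      ≤ ((((q-1 : Nat) : Int) - (pm : Int) : Int) : WithTop Int) + pminFun arr target pm := hub
  calc gm (termB arr target) arr.length
      ≤ ((((q-1 : Nat) : Int) - (pm : Int) : Int) : WithTop Int) + pminFun arr target pm := hub2
    _ ≤ (((q : Int) - (j : Int) : Int) : WithTop Int) + aFun arr target i :=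
        add_le_add (WithTop.coe_le_coe.mpr (by omega)) (pminFun_le arr target (by omega) (by omega))
    _ = aFun arr target i + (((q : Int) - (j : Int) : Int) : WithTop Int) := add_comm _ _
    _ = aFun arr target i + cFun arr target (i+1) := by rw [hcf]

theorem key_eq (arr : List Int) (target : Int) :
    gm (termA arr target) (arr.length - 1) = gm (termB arr target) arr.length :=
  le_antisymm (le_gm _ (fun i h1 h2 => ansA_le_termB arr target i h1 h2))
    (le_gm _ (fun i h1 h2 => ansB_le_termA arr target i h1 h2))

-- port invariants
theorem invA1 (arr : List Int) (target : Int) (k : Nat) :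
    passA1 arr target k =
      (lastP arr k, pfx arr k,
        fun j => if 1 ≤ j ∧ j ≤ k then aFun arr target j else ⊤) := by
  induction k with
  | zero =>
    have h1 : pvUpd (fun _ => none) 0 0 = lastP arr 0 := by
      funext v; simp [pvUpd, lastP]
    have h3 : (fun _ : Nat => (⊤ : WithTop Int)) =
        (fun j => if 1 ≤ j ∧ j ≤ 0 then aFun arr target j else ⊤) := by
      funext j; rw [if_neg (by omega)]
    show (pvUpd (fun _ => none) 0 0, (0:Int), fun _ => (⊤:WithTop Int)) = _
    rw [h1, h3]
    rfl
  | succ k ih =>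
    simp only [passA1, ih]
    rw [← pfx_succ]
    refine Prod.ext ?_ (Prod.ext rfl ?_)
    · funext v
      simp only [pvUpd, lastP]
    · cases hm : lastP arr k (pfx arr (k+1) - target) with
      | none =>
        simp only
        funext j
        by_cases hj : 1 ≤ j ∧ j ≤ k
        · rw [if_pos hj, if_pos ⟨hj.1, by omega⟩]
        · rw [if_neg hj]
          by_cases hj2 : j = k+1
          · subst hj2
            rw [if_pos ⟨by omega, le_refl _⟩]
            simp [aFun, hm]
          · rw [if_neg (by omega)]
      | some p =>
        simp only
        funext j
        simp only [pvSet]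
        by_cases hj2 : j = k+1
        · subst hj2
          rw [if_pos rfl, if_pos ⟨by omega, le_refl _⟩]
          simp [aFun, hm]
        · rw [if_neg hj2]
          by_cases hj : 1 ≤ j ∧ j ≤ k
          · rw [if_pos hj, if_pos ⟨hj.1, by omega⟩]
          · rw [if_neg hj, if_neg (by omega)]

theorem invA2 (arr : List Int) (target : Int) (t : Nat) (ht : t ≤ arr.length) :
    passA2 arr target arr.length t =
      (Qd arr arr.length t, pfx arr arr.length - pfx arr (arr.length - t),
        fun j => if arr.length - t + 1 ≤ j ∧ j ≤ arr.length then bFun arr target j else ⊤) := by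
  induction t with
  | zero =>
    have h1 : pvUpd (fun _ => none) 0 (arr.length+1) = Qd arr arr.length 0 := by
      funext v; simp [pvUpd, Qd]
    have h3 : (fun _ : Nat => (⊤ : WithTop Int)) =
        (fun j => if arr.length - 0 + 1 ≤ j ∧ j ≤ arr.length then bFun arr target j else ⊤) := by
      funext j; rw [if_neg (by omega)]
    show (pvUpd (fun _ => none) 0 (arr.length+1), (0:Int), fun _ => (⊤:WithTop Int)) = _
    rw [h1, h3]
    have : pfx arr arr.length - pfx arr (arr.length - 0) = 0 := by simp
    rw [← this]
  | succ t ih =>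
    have htn : t < arr.length := by omega
    simp only [passA2, ih (by omega)]
    have hs : pfx arr arr.length - pfx arr (arr.length - t) + arr.getD (arr.length - t - 1) 0
        = pfx arr arr.length - pfx arr (arr.length - (t+1)) := by
      have hp := pfx_succ arr (arr.length - t - 1)
      have he : arr.length - t - 1 + 1 = arr.length - t := by omega
      rw [he] at hp
      have he2 : arr.length - (t+1) = arr.length - t - 1 := by omega
      rw [he2, hp]
      ring
    rw [hs]
    refine Prod.ext ?_ (Prod.ext rfl ?_)
    · funext v
      have he2 : arr.length - (t+1) = arr.length - t - 1 := by omega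
      simp only [pvUpd, Qd, he2]
    · have hkey : arr.length - (t+1) = arr.length - t - 1 := by omega
      cases hm : Qd arr arr.length t (pfx arr arr.length - pfx arr (arr.length - (t+1)) - target) with
      | none =>
        simp only
        funext j
        by_cases hj : arr.length - t + 1 ≤ j ∧ j ≤ arr.length
        · rw [if_pos hj, if_pos ⟨by omega, hj.2⟩]
        · rw [if_neg hj]
          by_cases hj2 : j = arr.length - t
          · subst hj2
            rw [if_pos ⟨by omega, by omega⟩]
            have hnn : arr.length - (arr.length - t) = t := by omega
            have hii : arr.length - t - 1 = arr.length - (t+1) := by omega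
            simp [bFun, hnn, hii, hm]
          · rw [if_neg (by omega)]
      | some q =>
        simp only
        funext j
        simp only [pvSet]
        by_cases hj2 : j = arr.length - t
        · subst hj2
          rw [if_pos rfl, if_pos ⟨by omega, by omega⟩]
          have hnn : arr.length - (arr.length - t) = t := by omega
          have hii : arr.length - t - 1 = arr.length - (t+1) := by omega
          simp [bFun, hnn, hii, hm]
        · rw [if_neg hj2]
          by_cases hj : arr.length - t + 1 ≤ j ∧ j ≤ arr.length
          · rw [if_pos hj, if_pos ⟨by omega, hj.2⟩]
          · rw [if_neg hj, if_neg (by omega)]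

theorem invA3 (arr : List Int) (target : Int) (t : Nat) (ht : t ≤ arr.length - 1) :
    passA3 (bG arr target) arr.length t =
      fun j => if arr.length - t ≤ j ∧ j ≤ arr.length then cFun arr target j else ⊤ := by
  induction t with
  | zero =>
    funext j
    simp only [passA3, pvSet]
    by_cases hj : j = arr.length
    · subst hj
      rw [if_pos rfl, if_pos ⟨by omega, le_refl _⟩]
      have h0 : arr.length - arr.length = 0 := by omega
      simp [cFun, cAux]
    · rw [if_neg hj, if_neg (by omega)]
  | succ t ih =>
    have hn : t + 2 ≤ arr.length := by omega
    funext j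
    simp only [passA3, pvSet, ih (by omega)]
    by_cases hj : j = arr.length - 1 - t
    · subst hj
      rw [if_pos rfl, if_pos ⟨by omega, by omega⟩]
      have hc1 : arr.length - 1 - t + 1 = arr.length - t := by omega
      rw [hc1, if_pos ⟨by omega, by omega⟩]
      have hc2 : arr.length - (arr.length - 1 - t) = t + 1 := by omega
      have hc3 : arr.length - (arr.length - 1 - t + 1) = t := by omega
      rw [hc1] at hc3
      simp only [cFun, hc2, hc3, cAux, hc1]
    · rw [if_neg hj]
      by_cases hj2 : arr.length - t ≤ j ∧ j ≤ arr.length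
      · rw [if_pos hj2, if_pos ⟨by omega, hj2.2⟩]
      · rw [if_neg hj2, if_neg (by omega)]

theorem ansLoopA_eq (arr : List Int) (target : Int) (m : Nat) (hm : m ≤ arr.length - 1) :
    ansLoopA (fun j => if 1 ≤ j ∧ j ≤ arr.length then aFun arr target j else ⊤)
      (fun j => if arr.length - (arr.length - 1) ≤ j ∧ j ≤ arr.length then cFun arr target j else ⊤) m
      = gm (termA arr target) m := by
  induction m with
  | zero => rfl
  | succ k ih =>
    simp only [ansLoopA, gm, ih (by omega)]
    rw [if_pos ⟨by omega, by omega⟩, if_pos ⟨by omega, by omega⟩]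
    rfl

theorem invB (arr : List Int) (target : Int) (k : Nat) :
    passB arr target k =
      (lastP arr k, (fun j => if j ≤ k then pminFun arr target j else ⊤), pfx arr k,
        gm (termB arr target) k) := by
  induction k with
  | zero =>
    have h1 : pvUpd (fun _ => none) 0 0 = lastP arr 0 := by
      funext v; simp [pvUpd, lastP]
    have h2 : (fun _ : Nat => (⊤ : WithTop Int)) =
        (fun j => if j ≤ 0 then pminFun arr target j else ⊤) := by
      funext j
      by_cases hj : j ≤ 0
      · have : j = 0 := by omega
        subst this
        rw [if_pos (le_refl _)]
        rfl
      · rw [if_neg hj]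
    show (pvUpd (fun _ => none) 0 0, (fun _ => (⊤:WithTop Int)), (0:Int), (⊤:WithTop Int)) = _
    rw [h1, h2]
    rfl
  | succ k ih =>
    simp only [passB, ih]
    rw [← pfx_succ]
    have hwh : pvUpd (lastP arr k) (pfx arr (k+1)) (k+1) = lastP arr (k+1) := by
      funext v; simp only [pvUpd, lastP]
    have hpm : ∀ x : WithTop Int,
        (aFun arr target (k+1) = x) →
        pvSet (fun j => if j ≤ k then pminFun arr target j else ⊤) (k+1)
          (min (if k ≤ k then pminFun arr target k else ⊤) x)
        = (fun j => if j ≤ k+1 then pminFun arr target j else ⊤) := by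
      intro x hx
      funext j
      simp only [pvSet]
      by_cases hj2 : j = k+1
      · subst hj2
        rw [if_pos rfl, if_pos (le_refl _), if_pos (le_refl _)]
        show min (pminFun arr target k) x = pminFun arr target (k+1)
        rw [← hx]
        rfl
      · rw [if_neg hj2]
        by_cases hj : j ≤ k
        · rw [if_pos hj, if_pos (by omega)]
        · rw [if_neg hj, if_neg (by omega)]
    cases hm : lastP arr k (pfx arr (k+1) - target) with
    | none =>
      simp only
      rw [hwh, hpm ⊤ (by simp [aFun, hm])]
      have hans : gm (termB arr target) k = gm (termB arr target) (k+1) := by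
        show _ = min (gm (termB arr target) k) (termB arr target (k+1))
        have : termB arr target (k+1) = ⊤ := by simp [termB, hm]
        rw [this]
        exact (min_eq_left le_top).symm
      rw [hans]
    | some p =>
      simp only
      rw [hwh, hpm _ (by simp [aFun, hm])]
      obtain ⟨hp, _⟩ := lastP_sound arr k _ p hm
      rw [if_pos hp]
      have hans : min (gm (termB arr target) k)
          (((((k+1 : Nat) : Int) - (p : Int) : Int) : WithTop Int) + pminFun arr target p)
          = gm (termB arr target) (k+1) := by
        show _ = min (gm (termB arr target) k) (termB arr target (k+1))
        have : termB arr target (k+1)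
            = ((((k+1 : Nat) : Int) - (p : Int) : Int) : WithTop Int) + pminFun arr target p := by
          simp [termB, hm]
        rw [this]
      rw [hans]

theorem portA_eq (arr : List Int) (target : Int) :
    minSumOfLengths arr target = pvFin (gm (termA arr target) (arr.length - 1)) := by
  have h1 : (passA1 arr target arr.length).2.2
      = (fun j => if 1 ≤ j ∧ j ≤ arr.length then aFun arr target j else ⊤) := by
    rw [invA1]
  have h2 : (passA2 arr target arr.length arr.length).2.2 = bG arr target := by
    rw [invA2 arr target arr.length (le_refl _)]
    funext j
    simp only [bG]
    by_cases hj : 1 ≤ j ∧ j ≤ arr.length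
    · rw [if_pos ⟨by omega, hj.2⟩, if_pos hj]
    · rw [if_neg (by omega), if_neg hj]
  have h3 := invA3 arr target (arr.length - 1) (le_refl _)
  show pvFin (ansLoopA (passA1 arr target arr.length).2.2
      (passA3 (passA2 arr target arr.length arr.length).2.2 arr.length (arr.length - 1))
      (arr.length - 1)) = _
  rw [h1, h2, h3, ansLoopA_eq arr target (arr.length - 1) (le_refl _)]

theorem portB_eq (arr : List Int) (target : Int) :
    minSumOfLengths_alt arr target = pvFin (gm (termB arr target) arr.length) := by
  show pvFin (passB arr target arr.length).2.2.2 = _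
  rw [invB]

-- ===== VERDICT (by name: the statement is the Claim_ definition above) =====
theorem minSumOfLengths_spec : Claim_equal_minSumOfLengths := by
  intro arr target _
  unfold Spec_minSumOfLengths
  rw [portA_eq, portB_eq, key_eq]
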